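-- pv_equiv track=rewrite | github.com/g00dbyul/python_baekjoon | implementation/stastics.py | max_density_value
-- ===== SOURCE A (Python) =====
-- def max_density_value(frequency):
--     maximum = max(frequency.values())
--     numbers = []
--     for key in frequency.keys():
--         if frequency[key] == maximum:
--             numbers.append(key)
--     numbers.sort()
--     if len(numbers) == 1:
--         return numbers[0]
--     return numbers[1]
-- ===== SOURCE B (Python) =====
-- def max_density_value(frequency):
--     maximum = max(frequency.values())
--     count = 0
--     first = None
--     second = None
--     for k, v in frequency.items():
--         if v == maximum:
--             count += 1
--             if first is None or k < first:
--                 first, second = k, first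
--             elif second is None or k < second:
--                 second = k
--     return first if count == 1 else second
-- ===== Notes on version B (the rewrite author's own statement) =====
-- stated objective: alternative
-- what changed: Replaces the build-a-list-then-sort-then-index approach by a single selection pass over the items that maintains the smallest and second-smallest tied keys plus a tie counter, so no intermediate list and no sort are needed.
import Mathlib
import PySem

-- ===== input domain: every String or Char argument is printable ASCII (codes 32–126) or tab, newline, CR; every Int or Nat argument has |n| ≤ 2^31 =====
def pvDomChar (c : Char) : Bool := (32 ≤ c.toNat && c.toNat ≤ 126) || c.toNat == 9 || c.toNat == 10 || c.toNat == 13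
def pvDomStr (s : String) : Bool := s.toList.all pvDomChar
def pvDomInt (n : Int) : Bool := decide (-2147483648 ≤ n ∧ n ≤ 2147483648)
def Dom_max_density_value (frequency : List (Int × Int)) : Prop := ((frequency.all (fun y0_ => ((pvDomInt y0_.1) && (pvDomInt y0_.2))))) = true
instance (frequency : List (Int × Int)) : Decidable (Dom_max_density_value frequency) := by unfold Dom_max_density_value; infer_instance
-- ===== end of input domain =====

-- B replaces A's build-tied-list + sort + index by a single selection pass over the
-- dict items that tracks the smallest and second-smallest tied keys and a tie counter
-- (objective: alternative — no intermediate list and no sort).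


-- ===== PORT A =====
-- Literal port of A: max of the dict's values; collect the keys whose value equals the
-- maximum; sort; return the sole element, else the second. The `| none => 0` arm is
-- where Python's max([]) raises ValueError (excluded by Pre_); the pyGetD defaults are
-- never reached on a nonempty dict.
def max_density_value (frequency : List (Int × Int)) : Int :=
  let d := PySem.Dict.ofList frequency
  match PySem.List.max? d.values (fun v => v) with
  | none => 0
  | some maximum =>
    let numbers := d.keys.foldl
      (fun ns k => if d.getD k 0 == maximum then ns ++ [k] else ns) []
    let s := PySem.List.sorted numbers (fun x => x)
    if s.length == 1 then PySem.List.pyGetD s 0 0 else PySem.List.pyGetD s 1 0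

-- ===== PORT B =====
-- Literal port of Source B: one pass over frequency.items() maintaining (count, first,
-- second); `first`/`second` are Python's None-initialised variables, hence Option Int,
-- and the final `.getD 0` is Python's bare `return first`/`return second` (never None
-- when the dict is nonempty, since the maximum is attained).
def max_density_value_alt (frequency : List (Int × Int)) : Int :=
  let d := PySem.Dict.ofList frequency
  match PySem.List.max? d.values (fun v => v) with
  | none => 0
  | some maximum =>
    let st := d.items.foldl
      (fun (s : Int × Option Int × Option Int) kv =>
        if kv.2 == maximum then
          match s.2.1, s.2.2 with
          | none, sec => (s.1 + 1, some kv.1, sec)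
          | some f, none =>
              if kv.1 < f then (s.1 + 1, some kv.1, some f)
              else (s.1 + 1, some f, some kv.1)
          | some f, some sd =>
              if kv.1 < f then (s.1 + 1, some kv.1, some f)
              else if kv.1 < sd then (s.1 + 1, some f, some kv.1)
              else (s.1 + 1, some f, some sd)
        else s)
      (0, (none : Option Int), (none : Option Int))
    if st.1 == 1 then (st.2.1).getD 0 else (st.2.2).getD 0

-- ===== PRECONDITION & SPEC =====
-- Pre_ excludes only the empty dict, on which Python's max(frequency.values())
-- raises ValueError (in A and in B alike).
def Pre_max_density_value (frequency : List (Int × Int)) : Prop := frequency ≠ []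
instance (frequency : List (Int × Int)) : Decidable (Pre_max_density_value frequency) := by unfold Pre_max_density_value; infer_instance
def pvWitness_max_density_value : (List (Int × Int)) := [(1, 2), (3, 2), (0, 1)]

def Spec_max_density_value (frequency : List (Int × Int)) (out : Int) : Prop := out = max_density_value_alt frequency
instance (frequency : List (Int × Int)) (out : Int) : Decidable (Spec_max_density_value frequency out) := by unfold Spec_max_density_value; infer_instance

-- ===== CLAIM (what is proved, stated in full; the proofs are below) =====
def Claim_equal_max_density_value : Prop := ∀ (frequency : List (Int × Int)), Dom_max_density_value frequency → Pre_max_density_value frequency → Spec_max_density_value frequency (max_density_value frequency)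

-- ===== LEMMAS AND PROOFS =====

-- B's loop body, extracted for the invariant proof.
def pvStep (maximum : Int) (s : Int × Option Int × Option Int) (kv : Int × Int) :
    Int × Option Int × Option Int :=
  if kv.2 == maximum then
    match s.2.1, s.2.2 with
    | none, sec => (s.1 + 1, some kv.1, sec)
    | some f, none =>
        if kv.1 < f then (s.1 + 1, some kv.1, some f)
        else (s.1 + 1, some f, some kv.1)
    | some f, some sd =>
        if kv.1 < f then (s.1 + 1, some kv.1, some f)
        else if kv.1 < sd then (s.1 + 1, some f, some kv.1)
        else (s.1 + 1, some f, some sd)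
  else s

-- Appending an element to the input of Python's stable sort (with the identity key)
-- inserts it after all equal elements: exactly PySem.List.insertBy.
theorem pvSorted_append (ks : List Int) (x : Int) :
    PySem.List.sorted (ks ++ [x]) (fun y => y) =
      PySem.List.insertBy (fun a b => decide (a < b)) x (PySem.List.sorted ks (fun y => y)) := by
  rw [PySem.List.sorted_eq_foldl_insertBy, PySem.List.sorted_eq_foldl_insertBy, List.foldl_append]
  simp

-- Core invariant: folding B's step over any key list yields the length of that list
-- together with the first two elements of its sorted order (A's numbers[0], numbers[1]).
theorem pvFold_eq_sorted (maximum : Int) (ks : List Int) :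
    ks.foldl (fun s k => pvStep maximum s (k, maximum)) (0, none, none) =
      ((ks.length : Int),
        (PySem.List.sorted ks (fun x => x))[0]?,
        (PySem.List.sorted ks (fun x => x))[1]?) := by
  induction ks using List.reverseRecOn with
  | nil => simp [PySem.List.sorted]
  | append_singleton ks x ih =>
      rw [List.foldl_append, List.foldl_cons, List.foldl_nil, ih, pvSorted_append]
      cases hs : PySem.List.sorted ks (fun y => y) with
      | nil => simp [pvStep, PySem.List.insertBy, (PySem.List.sorted_eq_nil_iff ks _ _).mp hs]
      | cons a t =>
        have hlen : ks.length = (a :: t).length := by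
          rw [← hs]; exact (PySem.List.length_sorted ks _ _).symm
        cases t with
        | nil =>
          by_cases hxa : x < a <;>
            simp [pvStep, PySem.List.insertBy, hxa, hlen]
        | cons b r =>
          by_cases hxa : x < a <;> by_cases hxb : x < b <;>
            simp [pvStep, PySem.List.insertBy, hxa, hxb, hlen]

theorem max_density_value_eq (frequency : List (Int × Int)) :
    max_density_value frequency = max_density_value_alt frequency := by
  simp only [max_density_value, max_density_value_alt]
  set d := PySem.Dict.ofList frequency with hd
  cases hm : PySem.List.max? d.values (fun v => v) with
  | none => rfl
  | some maximum =>
    simp only []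
    -- A's loop builds the filtered key list
    rw [PySem.List.foldl_append_if (fun k => d.getD k 0 == maximum) (fun k => k) d.keys []]
    simp only [List.nil_append, List.map_id']
    set L := d.keys.filter (fun k => d.getD k 0 == maximum) with hL
    -- B's loop over items = pvStep-fold over the filtered keys
    have hitems : d.items = d.keys.map (fun k => (k, d.getD k 0)) :=
      PySem.Dict.items_eq_map_keys d (PySem.Dict.nodup_keys_ofList frequency) 0
    have hB : d.items.foldl
        (fun (s : Int × Option Int × Option Int) kv =>
          if kv.2 == maximum then
            match s.2.1, s.2.2 with
            | none, sec => (s.1 + 1, some kv.1, sec)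
            | some f, none =>
                if kv.1 < f then (s.1 + 1, some kv.1, some f)
                else (s.1 + 1, some f, some kv.1)
            | some f, some sd =>
                if kv.1 < f then (s.1 + 1, some kv.1, some f)
                else if kv.1 < sd then (s.1 + 1, some f, some kv.1)
                else (s.1 + 1, some f, some sd)
          else s)
        (0, (none : Option Int), (none : Option Int)) =
        L.foldl (fun s k => pvStep maximum s (k, maximum)) (0, none, none) := by
      rw [hitems, List.foldl_map, hL, List.foldl_filter]
      apply PySem.List.foldl_congr_mem
      intro s k _
      by_cases h : d.getD k 0 == maximum
      · have : d.getD k 0 = maximum := by exact_mod_cast eq_of_beq h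
        simp [pvStep, this]
      · simp [h]
    rw [hB, pvFold_eq_sorted]
    set s := PySem.List.sorted L (fun x => x) with hs
    have hlen : s.length = L.length := PySem.List.length_sorted L _ _
    by_cases h1 : L.length = 1
    · have hsl : s.length = 1 := by omega
      simp only [h1, hsl]
      obtain ⟨a, ha⟩ : ∃ a, s = [a] := List.length_eq_one_iff.mp hsl
      simp [ha, PySem.List.pyGetD_zero_cons]
    · have hA : (s.length == 1) = false := by simp [hlen, h1]
      have hB1 : ((L.length : Int) == 1) = false := by simp; omega
      rw [hA, hB1]
      simp only [Bool.false_eq_true, if_false]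
      cases hsc : s with
      | nil => simp [PySem.List.pyGetD, PySem.List.pyGet?, PySem.List.pyIdx?]
      | cons a t =>
        cases t with
        | nil => exfalso; apply h1; rw [← hlen, hsc]; rfl
        | cons b r =>
          rw [show ((1:Int)) = ((1:Nat):Int) by norm_num, PySem.List.pyGetD_natCast]
          simp

-- ===== VERDICT (by name: the statement is the Claim_ definition above) =====
theorem max_density_value_spec : Claim_equal_max_density_value := by
  intro f _ _
  exact max_density_value_eq f
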